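-- pv_equiv track=rewrite | github.com/sivaM777/PG-IT-service-management | ai-services/nlp-classifier/app.py | suggest_workflow
-- ===== SOURCE A (Python) =====
-- from typing import List, Optional
--
-- def suggest_workflow(text: str, category: str) -> tuple[bool, Optional[str], Optional[str], Optional[str]]:
--     lower = text.lower()
--     if any(kw in lower for kw in ["password", "reset", "forgot"]):
--         return True, "PASSWORD_RESET", "Confirm password reset", "AI can reset your password and send a reset notification. Approve to proceed."
--     if any(kw in lower for kw in ["account", "unlock", "locked", "lockout"]):
--         return True, "ACCOUNT_UNLOCK", "Confirm account unlock", "AI can unlock your account. Approve to proceed."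
--     if category == "NETWORK_VPN_WIFI" and any(kw in lower for kw in ["vpn", "connect", "connection"]):
--         return True, "VPN_BASIC_FIX", "Confirm VPN troubleshooting", "AI can run automated VPN connectivity checks and guide you through fixes. Approve to proceed."
--     if category == "HARDWARE_PERIPHERAL" and any(kw in lower for kw in ["printer", "print"]):
--         return True, "PRINTER_TROUBLESHOOT", "Confirm printer troubleshooting", "AI can run printer troubleshooting steps and guide you. Approve to proceed."
--     return False, None, None, None
-- ===== SOURCE B (Python) =====
-- from typing import Optional
--
-- # Inverted index: each trigger keyword maps to the priority of the workflow it triggers.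
-- _KEYWORD_PRIORITY = {
--     "password": 0, "reset": 0, "forgot": 0,
--     "account": 1, "unlock": 1, "locked": 1, "lockout": 1,
--     "vpn": 2, "connect": 2, "connection": 2,
--     "printer": 3, "print": 3,
-- }
--
-- # Workflows whose keywords only count inside a specific ticket category.
-- _CATEGORY_GATE = {2: "NETWORK_VPN_WIFI", 3: "HARDWARE_PERIPHERAL"}
--
-- _RESULTS = [
--     ("PASSWORD_RESET", "Confirm password reset",
--      "AI can reset your password and send a reset notification. Approve to proceed."),
--     ("ACCOUNT_UNLOCK", "Confirm account unlock",
--      "AI can unlock your account. Approve to proceed."),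
--     ("VPN_BASIC_FIX", "Confirm VPN troubleshooting",
--      "AI can run automated VPN connectivity checks and guide you through fixes. Approve to proceed."),
--     ("PRINTER_TROUBLESHOOT", "Confirm printer troubleshooting",
--      "AI can run printer troubleshooting steps and guide you. Approve to proceed."),
-- ]
--
-- def _render(priority):
--     if priority is None:
--         return (False, None, None, None)
--     wf, title, msg = _RESULTS[priority]
--     return (True, wf, title, msg)
--
-- def suggest_workflow(text: str, category: str) -> tuple[bool, Optional[str], Optional[str], Optional[str]]:
--     lower = text.lower()
--     hits = {p for kw, p in _KEYWORD_PRIORITY.items()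
--             if kw in lower and _CATEGORY_GATE.get(p, category) == category}
--     return _render(min(hits) if hits else None)
-- ===== Notes on version B (the rewrite author's own statement) =====
-- stated objective: alternative
-- what changed: Replaced the short-circuiting per-rule if-chain by an inverted keyword-to-priority index: B exhaustively collects the set of priorities of all matching keywords (category gates keyed by priority) and then selects the minimum priority, rendering the result from a priority-indexed table.
import Mathlib
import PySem

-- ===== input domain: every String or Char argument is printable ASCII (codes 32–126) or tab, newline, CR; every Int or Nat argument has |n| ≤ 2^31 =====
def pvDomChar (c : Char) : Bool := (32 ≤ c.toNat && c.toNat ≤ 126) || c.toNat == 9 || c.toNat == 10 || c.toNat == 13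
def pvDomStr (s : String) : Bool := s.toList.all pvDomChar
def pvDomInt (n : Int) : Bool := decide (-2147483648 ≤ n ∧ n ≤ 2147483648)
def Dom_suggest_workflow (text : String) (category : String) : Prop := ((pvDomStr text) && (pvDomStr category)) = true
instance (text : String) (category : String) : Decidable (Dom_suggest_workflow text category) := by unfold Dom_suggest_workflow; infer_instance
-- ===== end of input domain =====

-- B replaces A's short-circuiting if-chain by an inverted keyword→priority index with
-- exhaustive match collection and min-priority selection (objective: alternative, same cost).

-- ===== PORT A =====
-- Port of A: the literal if-chain.
def suggest_workflow (text : String) (category : String) : Bool × Option String × Option String × Option String :=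
  let lower := PySem.Str.lower text
  if ["password", "reset", "forgot"].any (fun kw => PySem.Str.isIn kw lower) then
    (true, some "PASSWORD_RESET", some "Confirm password reset", some "AI can reset your password and send a reset notification. Approve to proceed.")
  else if ["account", "unlock", "locked", "lockout"].any (fun kw => PySem.Str.isIn kw lower) then
    (true, some "ACCOUNT_UNLOCK", some "Confirm account unlock", some "AI can unlock your account. Approve to proceed.")
  else if category == "NETWORK_VPN_WIFI" && ["vpn", "connect", "connection"].any (fun kw => PySem.Str.isIn kw lower) then
    (true, some "VPN_BASIC_FIX", some "Confirm VPN troubleshooting", some "AI can run automated VPN connectivity checks and guide you through fixes. Approve to proceed.")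
  else if category == "HARDWARE_PERIPHERAL" && ["printer", "print"].any (fun kw => PySem.Str.isIn kw lower) then
    (true, some "PRINTER_TROUBLESHOOT", some "Confirm printer troubleshooting", some "AI can run printer troubleshooting steps and guide you. Approve to proceed.")
  else (false, none, none, none)

-- ===== PORT B =====
-- Port of B: inverted keyword→priority index, exhaustive hit collection, min-priority selection.
def pvKeywordPriority : List (String × Int) :=
  [("password", 0), ("reset", 0), ("forgot", 0),
   ("account", 1), ("unlock", 1), ("locked", 1), ("lockout", 1),
   ("vpn", 2), ("connect", 2), ("connection", 2),
   ("printer", 3), ("print", 3)]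

def pvCategoryGate : PySem.Dict Int String :=
  PySem.Dict.ofList [(2, "NETWORK_VPN_WIFI"), (3, "HARDWARE_PERIPHERAL")]

def pvResults : List (String × String × String) :=
  [("PASSWORD_RESET", "Confirm password reset", "AI can reset your password and send a reset notification. Approve to proceed."),
   ("ACCOUNT_UNLOCK", "Confirm account unlock", "AI can unlock your account. Approve to proceed."),
   ("VPN_BASIC_FIX", "Confirm VPN troubleshooting", "AI can run automated VPN connectivity checks and guide you through fixes. Approve to proceed."),
   ("PRINTER_TROUBLESHOOT", "Confirm printer troubleshooting", "AI can run printer troubleshooting steps and guide you. Approve to proceed.")]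

-- _render: the none branch of pyGet? is unreachable (every stored priority indexes pvResults).
def pvRender : Option Int → Bool × Option String × Option String × Option String
  | none => (false, none, none, none)
  | some p =>
    match PySem.List.pyGet? pvResults p with
    | some (wf, title, msg) => (true, some wf, some title, some msg)
    | none => (false, none, none, none)

def suggest_workflow_alt (text : String) (category : String) : Bool × Option String × Option String × Option String :=
  let lower := PySem.Str.lower text
  let hits : List Int := PySem.Set.ofList
    ((pvKeywordPriority.filter (fun kp =>
        PySem.Str.isIn kp.1 lower && (PySem.Dict.getD pvCategoryGate kp.2 category == category))).map (fun kp => kp.2))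
  pvRender (PySem.List.min? hits (fun p => p))

-- ===== PRECONDITION & SPEC =====
def Spec_suggest_workflow (text : String) (category : String) (out : Bool × Option String × Option String × Option String) : Prop := out = suggest_workflow_alt text category
instance (text : String) (category : String) (out : Bool × Option String × Option String × Option String) : Decidable (Spec_suggest_workflow text category out) := by unfold Spec_suggest_workflow; infer_instance

-- ===== CLAIM (what is proved, stated in full; the proofs are below) =====
def Claim_equal_suggest_workflow : Prop := ∀ (text : String) (category : String), Dom_suggest_workflow text category → Spec_suggest_workflow text category (suggest_workflow text category)

-- ===== LEMMAS AND PROOFS =====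

-- filter on a cons, phrased so literal lists unfold to a LINEAR concatenation of blocks
lemma pvFilterConsAppend {α : Type} (p : α → Bool) (x : α) (xs : List α) :
    List.filter p (x :: xs) = (if p x then [x] else []) ++ List.filter p xs := by
  by_cases h : p x <;> simp [h]

-- ===== VERDICT (by name: the statement is the Claim_ definition above) =====
set_option maxHeartbeats 2000000 in
theorem suggest_workflow_spec : Claim_equal_suggest_workflow := by
  intro text category _
  show suggest_workflow text category = suggest_workflow_alt text category
  simp only [suggest_workflow, suggest_workflow_alt, pvKeywordPriority, pvFilterConsAppend,
    List.filter_nil, List.map_append, List.append_nil, List.any_cons, List.any_nil, Bool.or_false,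
    show ∀ c : String, PySem.Dict.getD pvCategoryGate 0 c = c from fun _ => rfl,
    show ∀ c : String, PySem.Dict.getD pvCategoryGate 1 c = c from fun _ => rfl,
    show ∀ c : String, PySem.Dict.getD pvCategoryGate 2 c = "NETWORK_VPN_WIFI" from fun _ => rfl,
    show ∀ c : String, PySem.Dict.getD pvCategoryGate 3 c = "HARDWARE_PERIPHERAL" from fun _ => rfl,
    beq_self_eq_true, Bool.and_true]
  generalize PySem.Str.isIn "password" (PySem.Str.lower text) = b1
  generalize PySem.Str.isIn "reset" (PySem.Str.lower text) = b2
  generalize PySem.Str.isIn "forgot" (PySem.Str.lower text) = b3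
  generalize PySem.Str.isIn "account" (PySem.Str.lower text) = b4
  generalize PySem.Str.isIn "unlock" (PySem.Str.lower text) = b5
  generalize PySem.Str.isIn "locked" (PySem.Str.lower text) = b6
  generalize PySem.Str.isIn "lockout" (PySem.Str.lower text) = b7
  generalize PySem.Str.isIn "vpn" (PySem.Str.lower text) = b8
  generalize PySem.Str.isIn "connect" (PySem.Str.lower text) = b9
  generalize PySem.Str.isIn "connection" (PySem.Str.lower text) = b10
  generalize PySem.Str.isIn "printer" (PySem.Str.lower text) = b11
  generalize PySem.Str.isIn "print" (PySem.Str.lower text) = b12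
  rw [show (category == "NETWORK_VPN_WIFI") = ("NETWORK_VPN_WIFI" == category) from Bool.beq_comm,
     show (category == "HARDWARE_PERIPHERAL") = ("HARDWARE_PERIPHERAL" == category) from Bool.beq_comm]
  generalize ("NETWORK_VPN_WIFI" == category) = g3
  generalize ("HARDWARE_PERIPHERAL" == category) = g4
  revert b1 b2 b3 b4 b5 b6 b7 b8 b9 b10 b11 b12 g3 g4
  decide
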